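-- pv_equiv track=rewrite | github.com/oracle/macaron | src/macaron/build_spec_generator/maven_cli_parser.py | patch_mapping
-- ===== SOURCE A (Python) =====
-- from collections.abc import Mapping
--
-- def patch_mapping(
--     original: Mapping[str, str],
--     patch: Mapping[str, str | None],
-- ) -> dict[str, str]:
--     """Patch a mapping.
--
--     A key with value in patch set to None will be removed from the original.
--
--     Parameters
--     ----------
--     original: Mapping[str, str]
--         The original mapping.
--     patch: Mapping[str, str | None]
--         The patch.
--
--     Returns
--     -------
--     dict[str, str]:
--         The new dictionary after applying the patch.
--     """
--     patch_result = dict(original)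
--
--     for name, value in patch.items():
--         if value is None:
--             patch_result.pop(name, None)
--         else:
--             patch_result[name] = value
--
--     return patch_result
-- ===== SOURCE B (Python) =====
-- def patch_mapping(original, patch):
--     """Non-mutating re-implementation: build the kept entries by a lookup
--     pass over original, collect the freshly-added patch entries separately,
--     and make one dict of their concatenation."""
--     kept = []
--     for name, value in original.items():
--         if name in patch:
--             if patch[name] is not None:
--                 kept.append((name, patch[name]))
--         else:
--             kept.append((name, value))
--     added = [(name, value) for name, value in patch.items()
--              if value is not None and name not in original]
--     return dict(kept + added)
-- ===== Notes on version B (the rewrite author's own statement) =====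
-- stated objective: alternative
-- what changed: Replaces A's mutate-a-dict-copy loop over patch (pop on None, assign otherwise) by a non-mutating construction: a lookup pass over original producing the kept/overwritten entries, a separate comprehension over patch collecting the freshly added keys, and one dict() of their concatenation.
import Mathlib
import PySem

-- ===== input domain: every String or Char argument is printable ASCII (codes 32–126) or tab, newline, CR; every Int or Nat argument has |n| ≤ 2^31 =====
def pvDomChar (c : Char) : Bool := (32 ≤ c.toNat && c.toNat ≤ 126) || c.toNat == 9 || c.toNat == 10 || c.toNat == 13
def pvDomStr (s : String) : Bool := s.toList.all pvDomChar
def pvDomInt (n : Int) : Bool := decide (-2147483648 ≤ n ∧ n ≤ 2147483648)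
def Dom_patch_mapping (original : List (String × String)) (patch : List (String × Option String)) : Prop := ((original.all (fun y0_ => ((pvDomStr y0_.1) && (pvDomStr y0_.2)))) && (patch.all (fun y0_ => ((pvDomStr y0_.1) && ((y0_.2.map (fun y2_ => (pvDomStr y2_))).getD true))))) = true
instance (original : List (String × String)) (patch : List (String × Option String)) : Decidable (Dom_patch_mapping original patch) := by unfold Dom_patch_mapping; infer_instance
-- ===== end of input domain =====

-- B builds the result non-mutatingly (kept entries by lookup over original, added entries by a
-- filter over patch, one dict at the end) instead of A's pop/assign loop mutating a copy of original.

-- ===== PORT A =====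
-- for name, value in patch.items(): if value is None: patch_result.pop(name, None) else: patch_result[name] = value
-- (pop(name, None) discards the returned value, so it is exactly Dict.erase)
def stepA (d : PySem.Dict String String) (p : String × Option String) : PySem.Dict String String :=
  match p.2 with
  | none => d.erase p.1
  | some v => d.insert p.1 v

def patch_mapping (original : List (String × String)) (patch : List (String × Option String)) : List (String × String) :=
  -- patch_result = dict(original)
  let init : PySem.Dict String String := PySem.Dict.ofList original
  (patch.foldl stepA init).items

-- ===== PORT B =====
def patch_mapping_alt (original : List (String × String)) (patch : List (String × Option String)) : List (String × String) :=
  -- kept: loop over original; 'name in patch' / 'patch[name]' is first-match lookup on the mapping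
  let kept : List (String × String) := original.filterMap (fun kv =>
    match patch.lookup kv.1 with
    | some none => none                  -- name in patch, patched to None: dropped
    | some (some w) => some (kv.1, w)    -- name in patch: patched value
    | none => some kv)                   -- name not in patch: original value
  -- added = [(name, value) for name, value in patch.items() if value is not None and name not in original]
  let added : List (String × String) := patch.filterMap (fun kw =>
    match kw.2 with
    | some w => if (original.map Prod.fst).contains kw.1 then none else some (kw.1, w)
    | none => none)
  -- return dict(kept + added)
  (PySem.Dict.ofList (kept ++ added)).items

-- ===== PRECONDITION & SPEC =====
-- Pre_ restricts to assoc lists with distinct keys: both parameters are Python dicts (Mappings),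
-- so a duplicate-keyed list represents no actual input (it is an artefact of the dict→list encoding).
def Pre_patch_mapping (original : List (String × String)) (patch : List (String × Option String)) : Prop :=
  (original.map Prod.fst).Nodup ∧ (patch.map Prod.fst).Nodup
instance (original : List (String × String)) (patch : List (String × Option String)) : Decidable (Pre_patch_mapping original patch) := by unfold Pre_patch_mapping; infer_instance

def pvWitness_patch_mapping : (List (String × String)) × (List (String × Option String)) :=
  ([("a", "1"), ("b", "2")], [("b", none), ("c", some "3")])

def Spec_patch_mapping (original : List (String × String)) (patch : List (String × Option String)) (out : List (String × String)) : Prop := out = patch_mapping_alt original patch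
instance (original : List (String × String)) (patch : List (String × Option String)) (out : List (String × String)) : Decidable (Spec_patch_mapping original patch out) := by unfold Spec_patch_mapping; infer_instance

-- ===== CLAIM (what is proved, stated in full; the proofs are below) =====
def Claim_equal_patch_mapping : Prop := ∀ (original : List (String × String)) (patch : List (String × Option String)), Dom_patch_mapping original patch → Pre_patch_mapping original patch → Spec_patch_mapping original patch (patch_mapping original patch)

-- ===== LEMMAS AND PROOFS =====

-- B's two passes, as standalone functions of the loop state (used to state A's loop invariant).
def keptF (P : List (String × Option String)) (L : List (String × String)) : List (String × String) :=
  L.filterMap (fun kv =>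
    match P.lookup kv.1 with
    | some none => none
    | some (some w) => some (kv.1, w)
    | none => some kv)

def addedF (P : List (String × Option String)) (L : List (String × String)) : List (String × String) :=
  P.filterMap (fun kw =>
    match kw.2 with
    | some w => if (L.map Prod.fst).contains kw.1 then none else some (kw.1, w)
    | none => none)

theorem lookup_cons_eq (a k : String) (b : Option String) (l : List (String × Option String)) :
    List.lookup a ((k, b) :: l) = if a == k then some b else List.lookup a l := by
  rw [List.lookup]
  cases h : a == k <;> simp

theorem lookup_eq_none_of_not_mem {P : List (String × Option String)} {k : String}
    (h : k ∉ P.map Prod.fst) : P.lookup k = none := by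
  induction P with
  | nil => rfl
  | cons q P ih =>
      rcases q with ⟨k', w⟩
      simp only [List.map_cons, List.mem_cons, not_or] at h
      have hb : (k == k') = false := beq_eq_false_iff_ne.mpr h.1
      rw [lookup_cons_eq, hb]
      simpa using ih h.2

-- addedF only looks at L through key membership.
theorem addedF_congr {P : List (String × Option String)} {L L' : List (String × String)}
    (h : ∀ j ∈ P.map Prod.fst, (L.map Prod.fst).contains j = (L'.map Prod.fst).contains j) :
    addedF P L = addedF P L' := by
  unfold addedF
  apply List.filterMap_congr
  intro kw hkw
  have hj := h kw.1 (List.mem_map_of_mem hkw)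
  cases kw.2 with
  | none => rfl
  | some v => simp only [hj]

theorem contains_filter_of_ne {L : List (String × String)} {j k : String} (hne : j ≠ k) :
    ((L.filter (fun p => !(p.1 == k))).map Prod.fst).contains j = (L.map Prod.fst).contains j := by
  have hiff : (j ∈ (L.filter (fun p => !(p.1 == k))).map Prod.fst) ↔ j ∈ L.map Prod.fst := by
    constructor
    · intro h
      rcases List.mem_map.mp h with ⟨p, hp, rfl⟩
      exact List.mem_map_of_mem (List.mem_of_mem_filter hp)
    · intro h
      rcases List.mem_map.mp h with ⟨p, hp, rfl⟩
      refine List.mem_map_of_mem (List.mem_filter.mpr ⟨hp, ?_⟩)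
      simpa using hne
  simp [hiff]

theorem contains_append_singleton_of_ne {L : List (String × String)} {j k : String} {w : String}
    (hne : j ≠ k) :
    (((L ++ [(k, w)]).map Prod.fst).contains j) = (L.map Prod.fst).contains j := by
  simp [hne]

-- (1) a patched-to-None head turns into a key filter on the state
theorem keptF_none (P : List (String × Option String)) (k : String) (L : List (String × String)) :
    keptF ((k, none) :: P) L = keptF P (L.filter (fun p => !(p.1 == k))) := by
  induction L with
  | nil => rfl
  | cons kv L ih =>
      unfold keptF at ih ⊢
      rw [List.filter_cons, List.filterMap_cons, lookup_cons_eq]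
      by_cases h : kv.1 = k
      · have hb : (kv.1 == k) = true := beq_iff_eq.mpr h
        rw [hb]
        simpa using ih
      · have hb : (kv.1 == k) = false := beq_eq_false_iff_ne.mpr h
        rw [hb]
        simp only [Bool.not_false, if_true, if_false, List.filterMap_cons]
        rw [ih]
        cases hl : P.lookup kv.1 with
        | none => rfl
        | some w => cases w <;> rfl

-- (2) an overwriting head turns into an in-place map on the state (head key fresh in P)
theorem keptF_some_mem (P : List (String × Option String)) (k w : String)
    (L : List (String × String)) (hfresh : k ∉ P.map Prod.fst) :
    keptF ((k, some w) :: P) L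
      = keptF P (L.map (fun p => if p.1 == k then (k, w) else p)) := by
  unfold keptF
  rw [List.filterMap_map]
  apply List.filterMap_congr
  intro kv _
  simp only [Function.comp_def, lookup_cons_eq]
  by_cases h : kv.1 = k
  · have hb : (kv.1 == k) = true := beq_iff_eq.mpr h
    rw [hb]
    simp [h, lookup_eq_none_of_not_mem hfresh]
  · have hb : (kv.1 == k) = false := beq_eq_false_iff_ne.mpr h
    rw [hb]
    simp

-- (3) a fresh-key head is skipped by keptF …
theorem keptF_some_not_mem (P : List (String × Option String)) (k w : String)
    (L : List (String × String)) (hk : k ∉ L.map Prod.fst) :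
    keptF ((k, some w) :: P) L = keptF P L := by
  unfold keptF
  apply List.filterMap_congr
  intro kv hkv
  have h : kv.1 ≠ k := fun he => hk (he ▸ List.mem_map_of_mem hkv)
  rw [lookup_cons_eq, beq_eq_false_iff_ne.mpr h]
  simp

-- … and appending it to the state appends it to keptF
theorem keptF_append_singleton (P : List (String × Option String)) (k w : String)
    (L : List (String × String)) (hfresh : k ∉ P.map Prod.fst) :
    keptF P (L ++ [(k, w)]) = keptF P L ++ [(k, w)] := by
  unfold keptF
  rw [List.filterMap_append]
  simp [lookup_eq_none_of_not_mem hfresh]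

theorem map_fst_overwrite (L : List (String × String)) (k w : String) :
    (L.map (fun p => if p.1 == k then (k, w) else p)).map Prod.fst = L.map Prod.fst := by
  rw [List.map_map]
  apply List.map_congr_left
  intro p _
  by_cases h : p.1 = k <;> simp [Function.comp_def, h]

-- kept keys come from original keys (for the final Nodup argument)
theorem map_fst_keptF_sublist (P : List (String × Option String)) (L : List (String × String)) :
    ((keptF P L).map Prod.fst).Sublist (L.map Prod.fst) := by
  induction L with
  | nil => simp [keptF]
  | cons kv L ih =>
      unfold keptF at ih ⊢
      simp only [List.filterMap_cons]
      cases hl : P.lookup kv.1 with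
      | none => simpa using ih.cons₂ kv.1
      | some w =>
          cases w with
          | none => simpa using ih.cons kv.1
          | some v => simpa using ih.cons₂ kv.1

theorem map_fst_addedF_sublist (P : List (String × Option String)) (L : List (String × String)) :
    ((addedF P L).map Prod.fst).Sublist (P.map Prod.fst) := by
  induction P with
  | nil => simp [addedF]
  | cons kw P ih =>
      unfold addedF at ih ⊢
      simp only [List.filterMap_cons]
      cases kw.2 with
      | none => simpa using ih.cons kw.1
      | some v =>
          by_cases h : (L.map Prod.fst).contains kw.1 = true
          · simp only [h, if_true]; simpa using ih.cons kw.1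
          · simp only [h]; simpa using ih.cons₂ kw.1

theorem mem_map_fst_addedF {P : List (String × Option String)} {L : List (String × String)}
    {j : String} (h : j ∈ (addedF P L).map Prod.fst) : ¬ (L.map Prod.fst).contains j := by
  rcases List.mem_map.mp h with ⟨q, hq, hfst⟩
  rcases List.mem_filterMap.mp hq with ⟨kw, _, hf⟩
  cases hw : kw.2 with
  | none => rw [hw] at hf; simp at hf
  | some v =>
      rw [hw] at hf
      dsimp only at hf
      by_cases hc : (L.map Prod.fst).contains kw.1 = true
      · rw [if_pos hc] at hf
        simp at hf
      · rw [if_neg hc] at hf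
        cases hf
        simp only at hfst
        subst hfst
        simpa using hc

-- erase is definitionally a key filter on the items
theorem erase_items (d : PySem.Dict String String) (k : String) :
    (d.erase k).items = d.items.filter (fun p => !(p.1 == k)) := rfl

-- A's loop invariant: the state's items are B's kept part, and the yet-unadded fresh keys of the
-- remaining patch are exactly B's added part.
theorem loop_eq (patch : List (String × Option String)) :
    ∀ (d : PySem.Dict String String),
      d.keys.Nodup →
      (patch.map Prod.fst).Nodup →
      (patch.foldl stepA d).items = keptF patch d.items ++ addedF patch d.items := by
  induction patch with
  | nil => intro d _ _; simp [keptF, addedF]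
  | cons p patch ih =>
      rcases p with ⟨k, w?⟩
      intro d hnd hnp
      rw [List.map_cons, List.nodup_cons] at hnp
      obtain ⟨hkfresh, hnp'⟩ := hnp
      have hkeys : d.keys = d.items.map Prod.fst := rfl
      cases w? with
      | none =>
          rw [List.foldl_cons]
          have hstep : stepA d (k, none) = d.erase k := rfl
          rw [hstep]
          have hitems := erase_items d k
          have hnd' : (d.erase k).keys.Nodup := by
            show ((d.erase k).items.map Prod.fst).Nodup
            rw [hitems]
            exact (List.filter_sublist.map Prod.fst).nodup hnd
          rw [ih _ hnd' hnp', hitems]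
          rw [keptF_none]
          congr 1
          apply addedF_congr
          intro j hj
          exact contains_filter_of_ne (fun he => hkfresh (he ▸ hj))
      | some w =>
          rw [List.foldl_cons]
          have hstep : stepA d (k, some w) = d.insert k w := rfl
          rw [hstep]
          have hnd' : (d.insert k w).keys.Nodup := PySem.Dict.nodup_keys_insert d k w hnd
          by_cases hc : d.contains k = true
          · have hitems := PySem.Dict.items_insert_of_contains (d := d) (v := w) hc
            rw [ih _ hnd' hnp', hitems]
            rw [keptF_some_mem _ _ _ _ hkfresh]
            have hmemk : (d.items.map Prod.fst).contains k = true := by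
              have := (PySem.Dict.contains_iff_mem_keys d k).mp hc
              rw [hkeys] at this
              simpa using this
            have haddL : addedF ((k, some w) :: patch) d.items = addedF patch d.items := by
              unfold addedF
              rw [List.filterMap_cons]
              dsimp only
              rw [hmemk]
              simp
            rw [haddL]
            congr 1
            apply addedF_congr
            intro j _
            rw [map_fst_overwrite]
          · have hcf : d.contains k = false := by simpa using hc
            have hitems := PySem.Dict.items_insert_of_not_contains (d := d) (v := w) hcf
            rw [ih _ hnd' hnp', hitems]
            have hknotin : k ∉ d.items.map Prod.fst := by
              intro hmem
              have : d.contains k = true := by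
                apply (PySem.Dict.contains_iff_mem_keys d k).mpr
                rw [hkeys]; exact hmem
              simp [this] at hcf
            rw [keptF_append_singleton _ _ _ _ hkfresh,
                keptF_some_not_mem _ _ _ _ hknotin]
            have haddL : addedF ((k, some w) :: patch) d.items
                = (k, w) :: addedF patch d.items := by
              unfold addedF
              rw [List.filterMap_cons]
              dsimp only
              rw [show ((d.items.map Prod.fst).contains k) = false by simpa using hknotin]
              simp
            rw [haddL]
            have : addedF patch (d.items ++ [(k, w)]) = addedF patch d.items := by
              apply addedF_congr
              intro j hj
              exact contains_append_singleton_of_ne (fun he => hkfresh (he ▸ hj))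
            rw [this]
            simp
-- ofList over distinct keys just wraps the list.
theorem items_ofList_nodup {ν : Type} (l : List (String × ν)) (h : (l.map Prod.fst).Nodup) :
    (PySem.Dict.ofList l).items = l := by
  have := PySem.Dict.items_foldl_insert_fresh l Prod.fst Prod.snd (PySem.Dict.empty)
    (by intro a _; rfl) h
  simpa [PySem.Dict.ofList, PySem.Dict.update] using this

theorem patch_mapping_spec : Claim_equal_patch_mapping := by
  intro original patch _ hpre
  rcases hpre with ⟨hno, hnp⟩
  show patch_mapping original patch = patch_mapping_alt original patch
  unfold patch_mapping patch_mapping_alt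
  have hd0 : (PySem.Dict.ofList original).items = original := items_ofList_nodup _ hno
  have hkeys0 : (PySem.Dict.ofList original).keys.Nodup := PySem.Dict.nodup_keys_ofList _
  have hmain := loop_eq patch (PySem.Dict.ofList original) hkeys0 hnp
  rw [hd0] at hmain
  -- kept/added in the alt body ARE keptF/addedF
  have hkept : original.filterMap (fun kv =>
      match patch.lookup kv.1 with
      | some none => none
      | some (some w) => some (kv.1, w)
      | none => some kv) = keptF patch original := rfl
  have hadded : patch.filterMap (fun kw =>
      match kw.2 with
      | some w => if (original.map Prod.fst).contains kw.1 then none else some (kw.1, w)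
      | none => none) = addedF patch original := rfl
  -- the concatenation has distinct keys, so the final dict() wraps it
  have hnodup : (((keptF patch original ++ addedF patch original).map Prod.fst)).Nodup := by
    rw [List.map_append]
    apply List.Nodup.append
    · exact (map_fst_keptF_sublist patch original).nodup hno
    · exact (map_fst_addedF_sublist patch original).nodup hnp
    · intro j hjk hja
      have hjo : j ∈ original.map Prod.fst := (map_fst_keptF_sublist patch original).mem hjk
      exact (mem_map_fst_addedF hja) (by simpa using hjo)
  rw [hkept, hadded, items_ofList_nodup _ hnodup]
  exact hmain
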